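-- pv_equiv track=rewrite | github.com/achasseu/vCircTrappist | circHunter3.py | repet
-- ===== SOURCE A (Python) =====
-- def repet(seqa,seqb): #program to find repeated kmers by comparing two mated sequences
--     kmera=[]
--     kmerb=[]
--     total = 0
--     for a in range(len(seqa)-6):
--         kmera.append(seqa[a:a+7])
--     for b in range(len(seqb)-6):
--         kmerb.append(seqb[b:b+7])
--     for c in kmera:
--         if c in kmerb:
--             total=total+1
--     return (total)
-- ===== SOURCE B (Python) =====
-- def repet(seqa, seqb):
--     ka = sorted(seqa[i:i + 7] for i in range(len(seqa) - 6))
--     kb = sorted({seqb[j:j + 7] for j in range(len(seqb) - 6)})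
--     total = 0
--     i = 0
--     j = 0
--     while i < len(ka) and j < len(kb):
--         if ka[i] < kb[j]:
--             i += 1
--         elif kb[j] < ka[i]:
--             j += 1
--         else:
--             total += 1
--             i += 1
--     return total
-- ===== Notes on version B (the rewrite author's own statement) =====
-- stated objective: faster
-- what changed: Replaces A's per-position linear scan of the kmerb list with sort-then-merge: both k-mer collections are sorted (seqb's deduplicated) and a single two-pointer merge pass counts the matches.
import Mathlib
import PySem

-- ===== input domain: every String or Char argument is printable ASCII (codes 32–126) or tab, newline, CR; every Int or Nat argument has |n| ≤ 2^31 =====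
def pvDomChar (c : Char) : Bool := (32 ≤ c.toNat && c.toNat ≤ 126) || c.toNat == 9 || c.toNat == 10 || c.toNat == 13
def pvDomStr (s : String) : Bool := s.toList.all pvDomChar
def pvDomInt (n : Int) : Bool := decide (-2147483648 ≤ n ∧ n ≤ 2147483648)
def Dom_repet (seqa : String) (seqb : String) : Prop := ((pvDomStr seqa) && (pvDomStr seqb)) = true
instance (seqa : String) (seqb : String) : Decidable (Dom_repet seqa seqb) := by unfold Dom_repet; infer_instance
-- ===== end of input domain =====

-- B replaces A's per-position linear scan of the kmerb list by sort-then-merge: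
-- both k-mer collections are sorted (seqb's deduplicated) and one two-pointer
-- merge pass counts the matches (asymptotically faster).

-- ===== PORT A =====
def repet (seqa : String) (seqb : String) : Int :=
  let kmera : List (List Char) :=
    (PySem.List.pyRange 0 ((seqa.toList.length : Int) - 6) 1).foldl
      (fun acc a => acc ++ [PySem.List.slice seqa.toList (some a) (some (a + 7))]) []
  let kmerb : List (List Char) :=
    (PySem.List.pyRange 0 ((seqb.toList.length : Int) - 6) 1).foldl
      (fun acc b => acc ++ [PySem.List.slice seqb.toList (some b) (some (b + 7))]) []
  kmera.foldl (fun total c => if c ∈ kmerb then total + 1 else total) 0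

-- ===== PORT B =====
-- the while loop of Source B: two index pointers into the sorted lists
def repetMerge (ka kb : List (List Char)) (i j : Nat) (total : Int) : Int :=
  if h : i < ka.length ∧ j < kb.length then
    if ka.getD i [] < kb.getD j [] then repetMerge ka kb (i + 1) j total
    else if kb.getD j [] < ka.getD i [] then repetMerge ka kb i (j + 1) total
    else repetMerge ka kb (i + 1) j (total + 1)
  else total
termination_by (ka.length - i) + (kb.length - j)
decreasing_by all_goals omega

def repet_alt (seqa : String) (seqb : String) : Int :=
  let ka : List (List Char) :=
    PySem.List.sorted
      ((PySem.List.pyRange 0 ((seqa.toList.length : Int) - 6) 1).map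
        (fun i => PySem.List.slice seqa.toList (some i) (some (i + 7)))) (fun x => x) false
  let kb : List (List Char) :=
    PySem.List.sorted
      (PySem.Set.ofList
        ((PySem.List.pyRange 0 ((seqb.toList.length : Int) - 6) 1).map
          (fun j => PySem.List.slice seqb.toList (some j) (some (j + 7))))) (fun x => x) false
  repetMerge ka kb 0 0 0

-- ===== PRECONDITION & SPEC =====
def Spec_repet (seqa : String) (seqb : String) (out : Int) : Prop := out = repet_alt seqa seqb
instance (seqa : String) (seqb : String) (out : Int) : Decidable (Spec_repet seqa seqb out) := by unfold Spec_repet; infer_instance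

-- ===== CLAIM (what is proved, stated in full; the proofs are below) =====
def Claim_equal_repet : Prop := ∀ (seqa : String) (seqb : String), Dom_repet seqa seqb → Spec_repet seqa seqb (repet seqa seqb)

-- ===== LEMMAS AND PROOFS =====

-- the two-pointer merge over sorted suffixes counts seqa-kmers that occur in the kb suffix
lemma repetMerge_eq_countP (ka kb : List (List Char)) :
    ∀ i j (t : Int), (ka.drop i).Pairwise (· ≤ ·) → (kb.drop j).Pairwise (· ≤ ·) →
      repetMerge ka kb i j t
        = t + ((ka.drop i).countP (fun x => decide (x ∈ kb.drop j)) : Int) := by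
  intro i j t ha hb
  induction i, j, t using repetMerge.induct ka kb with
  | case1 i j t h hlt ih =>
      obtain ⟨hi, hj⟩ := id h
      rw [repetMerge, dif_pos h, if_pos hlt]
      have hdi : ka.drop i = ka[i] :: ka.drop (i + 1) := List.drop_eq_getElem_cons hi
      have hdj : kb.drop j = kb[j] :: kb.drop (j + 1) := List.drop_eq_getElem_cons hj
      have hxa : ka.getD i [] = ka[i] := List.getD_eq_getElem ka [] hi
      have hxb : kb.getD j [] = kb[j] := List.getD_eq_getElem kb [] hj
      have ha' : (ka.drop (i + 1)).Pairwise (· ≤ ·) := by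
        rw [hdi] at ha; exact ha.of_cons
      have hnot : ka[i] ∉ kb.drop j := by
        intro hm
        rw [hdj] at hm hb
        rw [hxa, hxb] at hlt
        rcases List.mem_cons.mp hm with he | hm'
        · exact ne_of_lt hlt he
        · exact absurd ((List.pairwise_cons.mp hb).1 _ hm') (not_le.mpr hlt)
      have hdecnot : decide (ka[i] ∈ kb.drop j) = false := decide_eq_false hnot
      rw [ih ha' hb, hdi, List.countP_cons, hdecnot]
      simp
  | case2 i j t h hnlt hlt ih =>
      obtain ⟨hi, hj⟩ := id h
      rw [repetMerge, dif_pos h, if_neg hnlt, if_pos hlt]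
      have hdi : ka.drop i = ka[i] :: ka.drop (i + 1) := List.drop_eq_getElem_cons hi
      have hdj : kb.drop j = kb[j] :: kb.drop (j + 1) := List.drop_eq_getElem_cons hj
      have hxa : ka.getD i [] = ka[i] := List.getD_eq_getElem ka [] hi
      have hxb : kb.getD j [] = kb[j] := List.getD_eq_getElem kb [] hj
      have hb' : (kb.drop (j + 1)).Pairwise (· ≤ ·) := by
        rw [hdj] at hb; exact hb.of_cons
      rw [ih ha hb']
      -- membership in kb.drop j and in kb.drop (j+1) agree on every element of ka.drop i
      have hcong : (ka.drop i).countP (fun x => decide (x ∈ kb.drop j))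
          = (ka.drop i).countP (fun x => decide (x ∈ kb.drop (j + 1))) := by
        apply List.countP_congr
        intro x hx
        have hgex : ka[i] ≤ x := by
          rw [hdi] at hx
          rcases List.mem_cons.mp hx with he | hm'
          · exact le_of_eq he.symm
          · rw [hdi] at ha; exact (List.pairwise_cons.mp ha).1 _ hm'
        have hylt : kb[j] < x := by
          rw [hxa, hxb] at hlt; exact hlt.trans_le hgex
        simp only [decide_eq_true_eq]
        rw [hdj, List.mem_cons]
        constructor
        · rintro (he | hm)
          · exact absurd he hylt.ne'
          · exact hm
        · exact Or.inr
      rw [hcong]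
  | case3 i j t h hnlt hnlt' ih =>
      obtain ⟨hi, hj⟩ := id h
      rw [repetMerge, dif_pos h, if_neg hnlt, if_neg hnlt']
      have hdi : ka.drop i = ka[i] :: ka.drop (i + 1) := List.drop_eq_getElem_cons hi
      have hdj : kb.drop j = kb[j] :: kb.drop (j + 1) := List.drop_eq_getElem_cons hj
      have hxa : ka.getD i [] = ka[i] := List.getD_eq_getElem ka [] hi
      have hxb : kb.getD j [] = kb[j] := List.getD_eq_getElem kb [] hj
      have heq : ka[i] = kb[j] := by
        rw [hxa, hxb] at hnlt hnlt'
        exact le_antisymm (not_lt.mp hnlt') (not_lt.mp hnlt)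
      have ha' : (ka.drop (i + 1)).Pairwise (· ≤ ·) := by
        rw [hdi] at ha; exact ha.of_cons
      have hmem : ka[i] ∈ kb.drop j := by rw [hdj, heq]; exact List.mem_cons_self
      have hdecmem : decide (ka[i] ∈ kb.drop j) = true := decide_eq_true hmem
      rw [ih ha' hb, hdi, List.countP_cons, hdecmem]
      simp
      ring
  | case4 i j t h =>
      rw [repetMerge, dif_neg h]
      rcases not_and_or.mp h with hi | hj
      · rw [List.drop_eq_nil_of_le (not_lt.mp hi)]; simp
      · rw [List.drop_eq_nil_of_le (not_lt.mp hj)]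
        have : (ka.drop i).countP (fun x => decide (x ∈ ([] : List (List Char)))) = 0 := by
          simp
        rw [this]; simp

theorem repet_spec : Claim_equal_repet := by
  intro seqa seqb _
  unfold Spec_repet repet repet_alt
  simp only []
  set la := (PySem.List.pyRange 0 ((seqa.toList.length : Int) - 6) 1).map
      (fun a => PySem.List.slice seqa.toList (some a) (some (a + 7))) with hla
  set lb := (PySem.List.pyRange 0 ((seqb.toList.length : Int) - 6) 1).map
      (fun b => PySem.List.slice seqb.toList (some b) (some (b + 7))) with hlb
  -- A side is countP (· ∈ lb) la
  rw [PySem.List.foldl_append_singleton_eq_map, PySem.List.foldl_append_singleton_eq_map]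
  rw [List.nil_append, List.nil_append, ← hla, ← hlb]
  rw [PySem.List.foldl_ite_add_one (p := fun c => c ∈ lb)]
  -- B side
  set ka := PySem.List.sorted la (fun x => x) false with hka
  set kb := PySem.List.sorted (PySem.Set.ofList lb) (fun x => x) false with hkb
  have hpa : ka.Pairwise (· ≤ ·) := by
    have h := PySem.List.sorted_pairwise la (fun x => x)
    convert h using 2
  have hpb : kb.Pairwise (· ≤ ·) := by
    have h := (PySem.List.sorted_ofList_pairwise_lt lb).imp (fun hlt => le_of_lt hlt)
    convert h using 2
  rw [repetMerge_eq_countP ka kb 0 0 0 (by simpa using hpa) (by simpa using hpb)]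
  simp only [List.drop_zero, zero_add]
  -- same count: ka ~ la and membership in kb ↔ membership in lb
  rw [(PySem.List.sorted_perm la (fun x => x) false).countP_eq]
  congr 1
  apply List.countP_congr
  intro x _
  simp only [hkb, PySem.List.mem_sorted, PySem.Set.mem_ofList]
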